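-- pv_equiv track=rewrite | github.com/Anil86/DP | MaxProfit.py | CollectMax
-- ===== SOURCE A (Python) =====
-- from enum import Enum
--
-- def CollectMax(array1, array2, penalty):
--     dp = [[None] * 2 for _ in range(len(array1) + 1)]
--
--     def CollectMax(i, previousArray):
--         # Solve small sub-problems
--         if i == len(array1):
--             dp[i][previousArray.value] = 0
--             return 0
--
--         # Divide
--         p = 0 if i == 0 else penalty   # No penalty when picking 1st item
--
--         # Choice 1: Pick array1
--         if dp[i + 1][PreviousArray.Array1.value] is None:
--             dp[i + 1][PreviousArray.Array1.value] = CollectMax(i + 1, PreviousArray.Array1)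
--         # If previous from array1, pick current array1 & find max from remaining
--         # If previous from array2, pick current array1, deduct penalty & find max from remaining
--         maxA = array1[i] + dp[i + 1][PreviousArray.Array1.value] \
--             if previousArray == PreviousArray.Array1 else \
--             array1[i] - p + dp[i + 1][PreviousArray.Array1.value]
--
--         # Choice 2: Pick array2
--         if dp[i + 1][PreviousArray.Array2.value] is None:
--             dp[i + 1][PreviousArray.Array2.value] = CollectMax(i + 1, PreviousArray.Array2)
--         # If previous from array1, pick current array2, deduct penalty & find max from remaining
--         # If previous from array2, pick current array2 & find max from remaining
--         maxB = array2[i] - p + dp[i + 1][PreviousArray.Array2.value] \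
--             if previousArray == PreviousArray.Array1 else \
--             array2[i] + dp[i + 1][PreviousArray.Array2.value]
--
--         # Combine
--         # Find max from choice 1 & 2
--         dp[i][previousArray.value] = max(maxA, maxB)
--         return dp[i][previousArray.value]
--
--     # Start from 1st item & previous array = array1
--     return CollectMax(0, PreviousArray.Array1)
--
-- PreviousArray = Enum("PreviousArray", {"Array1": 0, "Array2": 1})
-- ===== SOURCE B (Python) =====
-- def CollectMax(array1, array2, penalty):
--     # Bottom-up DP over the two "previous array" states; no recursion, no memo table.
--     g1 = 0  # best from i onward when previous pick was array1
--     g2 = 0  # best from i onward when previous pick was array2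
--     for i in reversed(range(len(array1))):
--         p = 0 if i == 0 else penalty
--         g1, g2 = (max(array1[i] + g1, array2[i] - p + g2),
--                   max(array1[i] - p + g1, array2[i] + g2))
--     return g1
-- ===== Notes on version B (the rewrite author's own statement) =====
-- stated objective: simpler
-- what changed: Replaced the memoized top-down recursion with an Enum-keyed dp table by a bottom-up loop keeping just two running state values (best-from-i when the previous pick came from array1 / array2), iterating i from n-1 down to 0.
import Mathlib
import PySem

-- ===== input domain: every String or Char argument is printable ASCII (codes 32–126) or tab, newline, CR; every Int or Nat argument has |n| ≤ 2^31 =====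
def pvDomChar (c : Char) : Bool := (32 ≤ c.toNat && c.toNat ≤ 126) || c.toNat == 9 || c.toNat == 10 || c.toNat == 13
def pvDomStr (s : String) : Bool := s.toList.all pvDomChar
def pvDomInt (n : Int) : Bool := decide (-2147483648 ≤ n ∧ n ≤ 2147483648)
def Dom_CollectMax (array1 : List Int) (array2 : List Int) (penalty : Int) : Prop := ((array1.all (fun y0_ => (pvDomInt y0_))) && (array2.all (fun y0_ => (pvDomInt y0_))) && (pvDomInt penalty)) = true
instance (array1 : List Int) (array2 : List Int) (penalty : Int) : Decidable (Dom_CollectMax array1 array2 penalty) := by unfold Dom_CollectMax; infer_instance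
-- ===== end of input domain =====

-- B replaces A's memoized top-down recursion (Enum-keyed dp table) by a bottom-up loop
-- keeping two running state values; objective: simpler (same O(n), O(1) space).

-- ===== PORT A =====
-- A's memo table dp[i][prev] is ported as a function Nat → Bool → Option Int
-- (prev = true ↔ PreviousArray.Array1), threaded through the recursion as state.
def pvUpd (dp : Nat → Bool → Option Int) (i : Nat) (b : Bool) (v : Int) :
    Nat → Bool → Option Int :=
  fun j c => if j = i ∧ c = b then some v else dp j c

-- fuel only bounds the recursion depth (each call recurses at i+1; top call has fuel
-- a1.length + 1, more than enough); the fuel-0 branch is never reached from the top call.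
def pvGoA (a1 a2 : List Int) (pen : Int) :
    Nat → Nat → Bool → (Nat → Bool → Option Int) → Int × (Nat → Bool → Option Int)
  | 0, _, _, dp => (0, dp)
  | fuel+1, i, prev, dp =>
    if i = a1.length then (0, pvUpd dp i prev 0)
    else
      let p : Int := if i = 0 then 0 else pen
      -- Choice 1: pick array1 (memo check, recursive fill)
      let r1 : Int × (Nat → Bool → Option Int) :=
        match dp (i+1) true with
        | some v => (v, dp)
        | none =>
          let r := pvGoA a1 a2 pen fuel (i+1) true dp
          (r.1, pvUpd r.2 (i+1) true r.1)
      let maxA : Int := if prev then a1.getD i 0 + r1.1 else a1.getD i 0 - p + r1.1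
      -- Choice 2: pick array2 (memo check, recursive fill)
      let r2 : Int × (Nat → Bool → Option Int) :=
        match r1.2 (i+1) false with
        | some v => (v, r1.2)
        | none =>
          let r := pvGoA a1 a2 pen fuel (i+1) false r1.2
          (r.1, pvUpd r.2 (i+1) false r.1)
      let maxB : Int := if prev then a2.getD i 0 - p + r2.1 else a2.getD i 0 + r2.1
      let m := max maxA maxB
      (m, pvUpd r2.2 i prev m)

def CollectMax (array1 : List Int) (array2 : List Int) (penalty : Int) : Int :=
  (pvGoA array1 array2 penalty (array1.length + 1) 0 true (fun _ _ => none)).1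

-- ===== PORT B =====
-- state s = (g1, g2): best collectable from i onward when previous pick was array1 / array2
def pvStepB (array1 : List Int) (array2 : List Int) (penalty : Int)
    (s : Int × Int) (i : Nat) : Int × Int :=
  let p : Int := if i = 0 then 0 else penalty
  (max (array1.getD i 0 + s.1) (array2.getD i 0 - p + s.2),
   max (array1.getD i 0 - p + s.1) (array2.getD i 0 + s.2))

def CollectMax_alt (array1 : List Int) (array2 : List Int) (penalty : Int) : Int :=
  ((List.range array1.length).reverse.foldl (pvStepB array1 array2 penalty) (0, 0)).1

-- ===== PRECONDITION & SPEC =====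
-- Pre_ excludes exactly the inputs where Python A raises IndexError (array2[i] for
-- i < len(array1) when array2 is shorter); A returns normally on all other inputs.
def Pre_CollectMax (array1 : List Int) (array2 : List Int) (penalty : Int) : Prop :=
  array1.length ≤ array2.length

instance (array1 : List Int) (array2 : List Int) (penalty : Int) :
    Decidable (Pre_CollectMax array1 array2 penalty) := by
  unfold Pre_CollectMax; infer_instance

def pvWitness_CollectMax : List Int × List Int × Int := ([1, 5, 2], [3, 1, 4], 2)

def Spec_CollectMax (array1 : List Int) (array2 : List Int) (penalty : Int) (out : Int) : Prop := out = CollectMax_alt array1 array2 penalty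
instance (array1 : List Int) (array2 : List Int) (penalty : Int) (out : Int) : Decidable (Spec_CollectMax array1 array2 penalty out) := by unfold Spec_CollectMax; infer_instance

-- ===== CLAIM (what is proved, stated in full; the proofs are below) =====
def Claim_equal_CollectMax : Prop := ∀ (array1 : List Int) (array2 : List Int) (penalty : Int), Dom_CollectMax array1 array2 penalty → Pre_CollectMax array1 array2 penalty → Spec_CollectMax array1 array2 penalty (CollectMax array1 array2 penalty)

-- ===== LEMMAS AND PROOFS =====

-- the pure value of A's recursion CollectMax(i, prev), with fuel j = len(array1) - i
def pvF (a1 a2 : List Int) (pen : Int) : Nat → Nat → Bool → Int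
  | 0, _, _ => 0
  | j+1, i, prev =>
    let p : Int := if i = 0 then 0 else pen
    max (if prev then a1.getD i 0 + pvF a1 a2 pen j (i+1) true
         else a1.getD i 0 - p + pvF a1 a2 pen j (i+1) true)
        (if prev then a2.getD i 0 - p + pvF a1 a2 pen j (i+1) false
         else a2.getD i 0 + pvF a1 a2 pen j (i+1) false)

-- memo-table invariant: every filled entry holds the pure value
def pvInv (a1 a2 : List Int) (pen : Int) (dp : Nat → Bool → Option Int) : Prop :=
  ∀ j b v, dp j b = some v → v = pvF a1 a2 pen (a1.length - j) j b

lemma pvInv_empty (a1 a2 : List Int) (pen : Int) :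
    pvInv a1 a2 pen (fun _ _ => none) := by
  intro j b v h; simp at h

lemma pvInv_upd (a1 a2 : List Int) (pen : Int) (dp : Nat → Bool → Option Int)
    (i : Nat) (b : Bool) (v : Int) (hdp : pvInv a1 a2 pen dp)
    (hv : v = pvF a1 a2 pen (a1.length - i) i b) :
    pvInv a1 a2 pen (pvUpd dp i b v) := by
  intro j c w h
  unfold pvUpd at h
  split at h
  · rename_i hjc
    obtain ⟨rfl, rfl⟩ := hjc
    cases h; exact hv
  · exact hdp j c w h

lemma pvGoA_correct (a1 a2 : List Int) (pen : Int) :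
    ∀ (fuel i : Nat) (prev : Bool) (dp : Nat → Bool → Option Int),
      i ≤ a1.length → a1.length - i < fuel → pvInv a1 a2 pen dp →
      (pvGoA a1 a2 pen fuel i prev dp).1 = pvF a1 a2 pen (a1.length - i) i prev ∧
      pvInv a1 a2 pen (pvGoA a1 a2 pen fuel i prev dp).2 := by
  intro fuel
  induction fuel with
  | zero => intro i prev dp _ hf _; omega
  | succ fuel ih =>
    intro i prev dp hle hf hdp
    by_cases hi : i = a1.length
    · subst hi
      simp only [pvGoA]
      constructor
      · simp [pvF]
      · exact pvInv_upd _ _ _ _ _ _ _ hdp (by simp [pvF])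
    · have hilt : i < a1.length := by omega
      have hkey : a1.length - i = (a1.length - (i+1)) + 1 := by omega
      simp only [pvGoA, if_neg hi]
      -- choice 1
      have h1 : ∀ (r1 : Int × (Nat → Bool → Option Int)),
          (r1 = match dp (i+1) true with
            | some v => (v, dp)
            | none =>
              let r := pvGoA a1 a2 pen fuel (i+1) true dp
              (r.1, pvUpd r.2 (i+1) true r.1)) →
          r1.1 = pvF a1 a2 pen (a1.length - (i+1)) (i+1) true ∧ pvInv a1 a2 pen r1.2 := by
        intro r1 hr1
        cases hd : dp (i+1) true with
        | some v =>
          rw [hd] at hr1; subst hr1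
          exact ⟨hdp _ _ _ hd, hdp⟩
        | none =>
          rw [hd] at hr1; subst hr1
          obtain ⟨hv, hinv⟩ := ih (i+1) true dp (by omega) (by omega) hdp
          exact ⟨hv, pvInv_upd _ _ _ _ _ _ _ hinv hv⟩
      obtain ⟨hv1, hinv1⟩ := h1 _ rfl
      -- choice 2
      have h2 : ∀ (dp1 : Nat → Bool → Option Int), pvInv a1 a2 pen dp1 →
          ∀ (r2 : Int × (Nat → Bool → Option Int)),
          (r2 = match dp1 (i+1) false with
            | some v => (v, dp1)
            | none =>
              let r := pvGoA a1 a2 pen fuel (i+1) false dp1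
              (r.1, pvUpd r.2 (i+1) false r.1)) →
          r2.1 = pvF a1 a2 pen (a1.length - (i+1)) (i+1) false ∧ pvInv a1 a2 pen r2.2 := by
        intro dp1 hdp1 r2 hr2
        cases hd : dp1 (i+1) false with
        | some v =>
          rw [hd] at hr2; subst hr2
          exact ⟨hdp1 _ _ _ hd, hdp1⟩
        | none =>
          rw [hd] at hr2; subst hr2
          obtain ⟨hv, hinv⟩ := ih (i+1) false dp1 (by omega) (by omega) hdp1
          exact ⟨hv, pvInv_upd _ _ _ _ _ _ _ hinv hv⟩
      obtain ⟨hv2, hinv2⟩ := h2 _ hinv1 _ rfl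
      rw [hkey]
      constructor
      · simp only [pvF, hv1, hv2]
      · apply pvInv_upd _ _ _ _ _ _ _ hinv2
        rw [hkey]
        simp only [pvF, hv1, hv2]

lemma pvA_eq_pvF (a1 a2 : List Int) (pen : Int) :
    CollectMax a1 a2 pen = pvF a1 a2 pen a1.length 0 true := by
  have h := (pvGoA_correct a1 a2 pen (a1.length + 1) 0 true (fun _ _ => none)
    (Nat.zero_le _) (by omega) (pvInv_empty a1 a2 pen)).1
  simpa [CollectMax] using h

lemma pvB_fold (a1 a2 : List Int) (pen : Int) :
    ∀ (j k : Nat),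
      (((List.range j).map (· + k)).reverse.foldl (pvStepB a1 a2 pen) (0, 0)) =
      (pvF a1 a2 pen j k true, pvF a1 a2 pen j k false) := by
  intro j
  induction j with
  | zero => intro k; simp [pvF]
  | succ j ih =>
    intro k
    have hmap : (List.range (j+1)).map (· + k)
        = (0 + k) :: (List.range j).map (· + (k + 1)) := by
      rw [List.range_succ_eq_map, List.map_cons, List.map_map]
      congr 1
      apply List.map_congr_left
      intro x _; simp only [Function.comp_apply]; omega
    rw [hmap, List.reverse_cons, List.foldl_append, ih (k+1)]
    simp only [List.foldl_cons, List.foldl_nil, Nat.zero_add]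
    simp only [pvStepB, pvF]
    rfl

lemma pvB_eq_pvF (a1 a2 : List Int) (pen : Int) :
    CollectMax_alt a1 a2 pen = pvF a1 a2 pen a1.length 0 true := by
  have h := pvB_fold a1 a2 pen a1.length 0
  simp only [Nat.add_zero, List.map_id'] at h
  simp [CollectMax_alt, h]

-- ===== VERDICT (by name: the statement is the Claim_ definition above) =====
theorem CollectMax_spec : Claim_equal_CollectMax := by
  intro a1 a2 pen _ _
  unfold Spec_CollectMax
  rw [pvA_eq_pvF, pvB_eq_pvF]
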